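-- pv_equiv track=rewrite | github.com/davll/practical-algorithms | LeetCode/930-binary_subarrays_with_sum.py | num_subarrays_v2
-- ===== SOURCE A (Python) =====
-- from collections import Counter
--
-- def num_subarrays_v2(A, S):
--     P = [0] + A[:]
--     for i in range(1, len(A)+1):
--         P[i] += P[i-1]
--     count = Counter()
--     ans = 0
--     for x in P:
--         ans += count[x]
--         count[x+S] += 1
--     return ans
-- ===== SOURCE B (Python) =====
-- def num_subarrays_v2(A, S):
--     ans = 0
--     for i in range(len(A)):
--         s = 0
--         for x in A[i:]:
--             s += x
--             if s == S:
--                 ans += 1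
--     return ans
-- ===== Notes on version B (the rewrite author's own statement) =====
-- stated objective: simpler
-- what changed: Replaced the prefix-sum array plus Counter-of-prefix-sums pass with a direct nested-loop enumeration of all subarrays, keeping a running sum per start index.
import Mathlib
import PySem

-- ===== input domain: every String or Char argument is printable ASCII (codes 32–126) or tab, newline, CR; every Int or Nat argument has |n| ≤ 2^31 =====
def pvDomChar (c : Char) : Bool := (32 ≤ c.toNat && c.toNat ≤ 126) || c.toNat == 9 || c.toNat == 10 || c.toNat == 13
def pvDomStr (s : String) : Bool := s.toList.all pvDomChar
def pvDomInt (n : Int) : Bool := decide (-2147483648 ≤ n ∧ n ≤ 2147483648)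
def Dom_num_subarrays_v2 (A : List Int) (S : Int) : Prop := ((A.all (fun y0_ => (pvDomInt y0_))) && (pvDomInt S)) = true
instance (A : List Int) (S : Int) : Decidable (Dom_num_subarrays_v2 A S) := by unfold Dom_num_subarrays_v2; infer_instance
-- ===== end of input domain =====

-- B replaces A's prefix-sum-array + Counter pass with a plain nested-loop enumeration of all
-- subarrays (objective: simpler); return values proved identical on all inputs.

-- ===== PORT A =====
-- P[i] / P[i-1] / P[i] = … are ported with pyGetD/pySetD: on every iteration 1 ≤ i ≤ len(A) < len(P),
-- so the Python indexing never raises and pyGetD/pySetD are exact there.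
def num_subarrays_v2 (A : List Int) (S : Int) : Int :=
  let P0 : List Int := 0 :: A
  let P := (PySem.List.pyRange 1 ((A.length : Int) + 1) 1).foldl
    (fun P i =>
      PySem.List.pySetD P i (PySem.List.pyGetD P i 0 + PySem.List.pyGetD P (i - 1) 0)) P0
  let r := P.foldl
    (fun (st : PySem.Dict Int Int × Int) x =>
      (st.1.modify (x + S) 0 (· + 1), st.2 + st.1.getD x 0))
    (PySem.Dict.empty, 0)
  r.2

-- ===== PORT B =====
def num_subarrays_v2_alt (A : List Int) (S : Int) : Int :=
  (PySem.List.pyRange 0 (A.length : Int) 1).foldl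
    (fun ans i =>
      ((PySem.List.slice A (some i) none).foldl
        (fun (p : Int × Int) x => (p.1 + x, if p.1 + x = S then p.2 + 1 else p.2))
        (0, ans)).2)
    0

-- ===== PRECONDITION & SPEC =====
def Spec_num_subarrays_v2 (A : List Int) (S : Int) (out : Int) : Prop := out = num_subarrays_v2_alt A S
instance (A : List Int) (S : Int) (out : Int) : Decidable (Spec_num_subarrays_v2 A S out) := by unfold Spec_num_subarrays_v2; infer_instance

-- ===== CLAIM (what is proved, stated in full; the proofs are below) =====
def Claim_equal_num_subarrays_v2 : Prop := ∀ (A : List Int) (S : Int), Dom_num_subarrays_v2 A S → Spec_num_subarrays_v2 A S (num_subarrays_v2 A S)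

-- ===== LEMMAS AND PROOFS =====

-- running prefix sums starting from accumulator s (what A's in-place loop builds after the leading 0)
def preAcc (s : Int) : List Int → List Int
  | [] => []
  | a :: xs => (s + a) :: preAcc (s + a) xs

-- number of nonempty prefixes of xs whose running sum, started at s, hits the target c
def cntFrom (c s : Int) : List Int → Int
  | [] => 0
  | a :: xs => (if s + a = c then 1 else 0) + cntFrom c (s + a) xs

-- number of pairs i < j in P with P[j] = P[i] + S (what A's Counter pass counts)
def pairsC (S : Int) : List Int → Int
  | [] => 0
  | x :: xs => (xs.count (x + S) : Int) + pairsC S xs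

-- B's total: for each suffix, count its prefixes summing to S
def bfSum (S : Int) : List Int → Int
  | [] => 0
  | a :: xs => cntFrom S 0 (a :: xs) + bfSum S xs

theorem cntFrom_shift (c : Int) : ∀ (xs : List Int) (s d : Int),
    cntFrom (c + d) (s + d) xs = cntFrom c s xs := by
  intro xs
  induction xs with
  | nil => intro s d; rfl
  | cons a xs ih =>
    intro s d
    simp only [cntFrom]
    rw [show s + d + a = (s + a) + d by ring, ih]
    congr 1
    by_cases h : s + a = c
    · simp [h]
    · simp [h, show ¬ (s + a + d = c + d) by omega]

theorem count_preAcc (c : Int) : ∀ (xs : List Int) (s : Int),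
    ((preAcc s xs).count c : Int) = cntFrom c s xs := by
  intro xs
  induction xs with
  | nil => intro s; simp [preAcc, cntFrom]
  | cons a xs ih =>
    intro s
    simp only [preAcc, cntFrom, List.count_cons, ← ih]
    by_cases h : s + a = c <;> simp [h] <;> push_cast <;> ring

theorem pairsC_preAcc (S : Int) : ∀ (xs : List Int) (s : Int),
    pairsC S (s :: preAcc s xs) = bfSum S xs := by
  intro xs
  induction xs with
  | nil => intro s; simp [preAcc, pairsC, bfSum]
  | cons a xs ih =>
    intro s
    have hsh : cntFrom (S + s) (a + s) xs = cntFrom S a xs := cntFrom_shift S xs a s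
    have hc : ((preAcc (s + a) xs).count (s + S) : Int) = cntFrom (s + S) (s + a) xs :=
      count_preAcc _ xs (s + a)
    have hc' : cntFrom (s + S) (s + a) xs = cntFrom S a xs := by
      rw [← hsh]; ring_nf
    simp only [preAcc, pairsC, bfSum, cntFrom, List.count_cons, ← ih (s + a)]
    push_cast
    rw [hc, hc']
    by_cases h : a = S
    · simp [h]; ring
    · have h1 : ¬ (s + a = s + S) := by omega
      simp [h, h1]

theorem inner_loop (S : Int) : ∀ (xs : List Int) (s ans : Int),
    (xs.foldl (fun (p : Int × Int) x => (p.1 + x, if p.1 + x = S then p.2 + 1 else p.2)) (s, ans)).2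
    = ans + cntFrom S s xs := by
  intro xs
  induction xs with
  | nil => intro s ans; simp [cntFrom]
  | cons a xs ih =>
    intro s ans
    simp only [List.foldl_cons, cntFrom, ih]
    by_cases h : s + a = S <;> simp [h] <;> ring

theorem sum_getD_modify (d : PySem.Dict Int Int) (k : Int) : ∀ (xs : List Int),
    (xs.map (fun y => (d.modify k 0 (· + 1)).getD y 0)).sum
    = (xs.map (fun y => d.getD y 0)).sum + (xs.count k : Int) := by
  intro xs
  induction xs with
  | nil => simp
  | cons y xs ih =>
    simp only [List.map_cons, List.sum_cons, ih, List.count_cons]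
    by_cases h : y = k
    · subst h
      rw [PySem.Dict.getD_modify_self]
      push_cast
      simp; ring
    · rw [PySem.Dict.getD_modify_of_ne d 0 _ h]
      simp [h]; ring

theorem counter_loop (S : Int) : ∀ (P : List Int) (d : PySem.Dict Int Int) (ans : Int),
    (P.foldl
      (fun (st : PySem.Dict Int Int × Int) x =>
        (st.1.modify (x + S) 0 (· + 1), st.2 + st.1.getD x 0))
      (d, ans)).2
    = ans + (P.map (fun x => d.getD x 0)).sum + pairsC S P := by
  intro P
  induction P with
  | nil => intro d ans; simp [pairsC]
  | cons x P ih =>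
    intro d ans
    simp only [List.foldl_cons, ih, pairsC, List.map_cons, List.sum_cons,
      sum_getD_modify]
    ring

theorem prefix_loop : ∀ (rest done : List Int) (s : Int),
    (PySem.List.pyRange ((done.length : Int) + 1) ((done.length : Int) + 1 + (rest.length : Int)) 1).foldl
      (fun P i =>
        PySem.List.pySetD P i (PySem.List.pyGetD P i 0 + PySem.List.pyGetD P (i - 1) 0))
      (done ++ s :: rest)
    = done ++ s :: preAcc s rest := by
  intro rest
  induction rest with
  | nil =>
    intro done s
    rw [PySem.List.pyRange_one_eq_nil (by simp)]
    simp [preAcc]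
  | cons a rest ih =>
    intro done s
    rw [PySem.List.pyRange_one_cons (by push_cast [List.length_cons]; omega)]
    rw [List.foldl_cons]
    have hP : done ++ s :: a :: rest = (done ++ [s]) ++ a :: rest := by simp
    have hlen : ((done.length : Int) + 1) = (((done ++ [s]).length : Nat) : Int) := by
      push_cast; simp
    have hstep :
        PySem.List.pySetD (done ++ s :: a :: rest) ((done.length : Int) + 1)
          (PySem.List.pyGetD (done ++ s :: a :: rest) ((done.length : Int) + 1) 0 +
           PySem.List.pyGetD (done ++ s :: a :: rest) ((done.length : Int) + 1 - 1) 0)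
        = (done ++ [s]) ++ (s + a) :: rest := by
      rw [hP, hlen]
      rw [PySem.List.pySetD_natCast]
      have hg1 : PySem.List.pyGetD ((done ++ [s]) ++ a :: rest) (((done ++ [s]).length : Nat) : Int) 0 = a := by
        rw [PySem.List.pyGetD_natCast]
        simp [List.getD_eq_getElem?_getD]
      have hg2 : PySem.List.pyGetD ((done ++ [s]) ++ a :: rest) ((((done ++ [s]).length : Nat) : Int) - 1) 0 = s := by
        have : ((((done ++ [s]).length : Nat) : Int) - 1) = ((done.length : Nat) : Int) := by
          push_cast; simp
        rw [this, PySem.List.pyGetD_natCast]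
        simp [List.getD_eq_getElem?_getD, List.getElem?_append_right]
      rw [hg1, hg2]
      rw [List.set_append]
      simp [Int.add_comm a s]
    rw [hstep]
    have hrange : (PySem.List.pyRange ((done.length : Int) + 1 + 1)
          ((done.length : Int) + 1 + ((a :: rest).length : Int)) 1)
        = (PySem.List.pyRange (((done ++ [s]).length : Int) + 1)
          (((done ++ [s]).length : Int) + 1 + ((rest).length : Int)) 1) := by
      congr 1 <;> push_cast <;> simp <;> ring
    rw [hrange, ih (done ++ [s]) (s + a)]
    simp [preAcc]

theorem sum_cnt_drop (S : Int) : ∀ (A : List Int),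
    ((List.range A.length).map (fun k => cntFrom S 0 (A.drop k))).sum = bfSum S A := by
  intro A
  induction A with
  | nil => simp [bfSum]
  | cons a A ih =>
    rw [List.length_cons, List.range_succ_eq_map]
    simp only [List.map_cons, List.map_map, List.sum_cons, List.drop_zero, bfSum]
    have : ((fun k => cntFrom S 0 (List.drop k (a :: A))) ∘ Nat.succ)
        = (fun k => cntFrom S 0 (List.drop k A)) := by
      funext x; rfl
    rw [this, ih]

theorem alt_eq_bfSum (A : List Int) (S : Int) : num_subarrays_v2_alt A S = bfSum S A := by
  unfold num_subarrays_v2_alt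
  have hcong := PySem.List.foldl_congr_mem (PySem.List.pyRange 0 (A.length : Int) 1)
    (fun ans i =>
      ((PySem.List.slice A (some i) none).foldl
        (fun (p : Int × Int) x => (p.1 + x, if p.1 + x = S then p.2 + 1 else p.2))
        (0, ans)).2)
    (fun ans i => ans + cntFrom S 0 (A.drop i.toNat)) 0
    (by
      intro acc i hi
      have h0 : 0 ≤ i := (PySem.List.mem_pyRange_one.mp hi).1
      beta_reduce
      rw [PySem.List.slice_from _ h0, inner_loop])
  rw [hcong, PySem.List.foldl_add, PySem.List.pyRange_zero_natCast, List.map_map]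
  simpa using sum_cnt_drop S A

theorem a_eq_pairs (A : List Int) (S : Int) :
    num_subarrays_v2 A S = pairsC S (0 :: preAcc 0 A) := by
  have key : (PySem.List.pyRange 1 ((A.length : Int) + 1) 1).foldl
      (fun P i =>
        PySem.List.pySetD P i (PySem.List.pyGetD P i 0 + PySem.List.pyGetD P (i - 1) 0))
      ((0 : Int) :: A) = (0 : Int) :: preAcc 0 A := by
    have h := prefix_loop A [] 0
    simp only [List.nil_append, List.length_nil, Nat.cast_zero, zero_add] at h
    rw [← h]
    congr 1
    ring_nf
  simp only [num_subarrays_v2, key, counter_loop]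
  simp [PySem.Dict.getD, PySem.Dict.empty, PySem.Dict.get?]

-- ===== VERDICT (by name: the statement is the Claim_ definition above) =====
theorem num_subarrays_v2_spec : Claim_equal_num_subarrays_v2 := by
  intro A S _
  unfold Spec_num_subarrays_v2
  rw [a_eq_pairs, pairsC_preAcc, alt_eq_bfSum]
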